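-- pv_equiv track=rewrite | github.com/chotarahat/CSE221-SUMMER-25--BRACU | Answers/A6_Second_Task.py | football_match
-- ===== SOURCE A (Python) =====
-- def football_match(N_players, M_tackles):
--   from sys import setrecursionlimit
--   setrecursionlimit(1 << 25)
--   graph = [[] for i in range(N_players + 1)]
--
--   for U_tackled, V in M_tackles:
--     graph[U_tackled].append(V)
--     graph[V].append(U_tackled)
--
--   visited = [False] * (N_players + 1)
--   color = [0]*(N_players+1)
--
--   def DFS(U_tackled, C):
--     visited[U_tackled] = True
--     color[U_tackled] = C
--
--     count =[0,0]
--     count[0 if C==1 else -1]+=1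
--
--     for V in graph[U_tackled]:
--       if not visited[V]:
--         sub = DFS(V, -C)
--         count[0] += sub[0]
--         count[1] += sub[1]
--       elif color[V] == color[U_tackled]:
--         pass
--     return count
--
--   max_group = 0
--   for i in range(1, N_players + 1):
--     if not visited[i]:
--       a,b = DFS(i,1)
--       max_group += max(a,b)
--   return max_group
-- ===== SOURCE B (Python) =====
-- def football_match(N_players, M_tackles):
--     graph = [[] for _ in range(N_players + 1)]
--     for u, v in M_tackles:
--         graph[u].append(v)
--         graph[v].append(u)
--     visited = [False] * (N_players + 1)
--     total = 0
--     for i in range(1, N_players + 1):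
--         if visited[i]:
--             continue
--         count0 = 0
--         count1 = 0
--         stack = [(i, 1)]
--         while stack:
--             u, c = stack.pop()
--             if visited[u]:
--                 continue
--             visited[u] = True
--             if c == 1:
--                 count0 += 1
--             else:
--                 count1 += 1
--             for v in reversed(graph[u]):
--                 stack.append((v, -c))
--         total += max(count0, count1)
--     return total
-- ===== Notes on version B (the rewrite author's own statement) =====
-- stated objective: alternative
-- what changed: Replaces the recursive DFS that returns and sums per-subtree colour-count pairs with an iterative DFS over an explicit stack of (node, colour) pairs that marks, colours and counts each node when it is first popped (neighbours pushed in reverse so discovery order equals the recursive preorder), accumulating the two colour-class counts per component directly.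
import Mathlib
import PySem

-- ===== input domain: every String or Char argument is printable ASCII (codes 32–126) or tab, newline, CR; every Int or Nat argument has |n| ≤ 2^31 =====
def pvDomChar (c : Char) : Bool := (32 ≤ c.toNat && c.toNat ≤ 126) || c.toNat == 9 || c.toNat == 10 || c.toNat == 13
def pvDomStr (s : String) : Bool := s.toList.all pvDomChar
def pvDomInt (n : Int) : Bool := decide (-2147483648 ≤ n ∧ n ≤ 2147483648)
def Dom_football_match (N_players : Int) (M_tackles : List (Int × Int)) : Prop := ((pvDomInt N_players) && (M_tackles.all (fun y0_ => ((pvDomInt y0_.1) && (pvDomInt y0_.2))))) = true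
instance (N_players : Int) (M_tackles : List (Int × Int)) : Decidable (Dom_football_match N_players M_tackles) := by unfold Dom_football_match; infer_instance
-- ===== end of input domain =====

-- B replaces the recursive subtree-count DFS with an iterative explicit-stack DFS (same
-- preorder, counts accumulated at pop time); equivalence of the two traversals is proved below.

-- number of still-unvisited slots; termination measure for both traversals
def pvCF (vis : List Bool) : Nat := vis.countP (fun b => !b)

-- `visited[i]` read as false means: a real in-range slot holds false (used for termination)
theorem pvGetDfalse {xs : List Bool} {i : Int} (h : PySem.List.pyGetD xs i true = false) :
    ∃ k, PySem.List.pyIdx? xs.length i = some k ∧ k < xs.length ∧ xs[k]? = some false := by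
  simp [PySem.List.pyGetD, PySem.List.pyGet?] at h
  rcases hk : PySem.List.pyIdx? xs.length i with _ | k
  · simp [hk] at h
  · simp [hk] at h
    rcases hg : xs[k]? with _ | b
    · simp [hg] at h
    · simp [hg] at h
      exact ⟨k, rfl, by simpa using (List.getElem?_eq_some_iff.mp hg).1, by simp [hg, h]⟩

theorem pvCF_set_lt {xs : List Bool} {k : Nat} (hk : k < xs.length) (hx : xs[k] = false) :
    pvCF (xs.set k true) < pvCF xs := by
  unfold pvCF
  have h1 := List.set_eq_take_cons_drop true hk
  have h2 : xs = xs.take k ++ xs[k] :: xs.drop (k+1) := by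
    conv_lhs => rw [← List.take_append_drop k xs, ← List.getElem_cons_drop hk]
  rw [h1]; conv_rhs => rw [h2]
  simp [List.countP_append, hx]

theorem pvCF_pySetD_lt {xs : List Bool} {i : Int} (h : PySem.List.pyGetD xs i true = false) :
    pvCF (PySem.List.pySetD xs i true) < pvCF xs := by
  obtain ⟨k, hk, hlt, hf⟩ := pvGetDfalse h
  have hx : xs[k] = false := by simpa using (List.getElem?_eq_some_iff.mp hf).2
  simp [PySem.List.pySetD, PySem.List.pySet?, hk]
  exact pvCF_set_lt hlt hx

-- ===== PORT A =====
-- graph[i].append(x)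
def pvAppendAt (g : List (List Int)) (i : Int) (x : Int) : List (List Int) :=
  PySem.List.pySetD g i (PySem.List.pyGetD g i [] ++ [x])

mutual
-- def DFS(U, C): mark, colour, count own node, then recurse into unvisited neighbours
def pvDfsA (graph : List (List Int)) (fuel : Nat) (U C : Int) (vis : List Bool) (col : List Int) :
    (List Bool × List Int) × (Int × Int) :=
  match fuel with
  | 0 => ((vis, col), (0, 0))   -- fuel guard only; never reached (fuel ≥ unvisited count + 1)
  | f + 1 =>
      let vis' := PySem.List.pySetD vis U true
      let col' := PySem.List.pySetD col U C
      let cnt : Int × Int := if C = 1 then (1, 0) else (0, 1)  -- count[0 if C==1 else -1] += 1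
      pvLoopA graph f (PySem.List.pyGetD graph U []) C vis' col' cnt
termination_by (fuel, 0)

-- for V in graph[U]: if not visited[V]: sub = DFS(V,-C); count += sub  (elif colour clash: pass)
def pvLoopA (graph : List (List Int)) (fuel : Nat) (nbrs : List Int) (C : Int)
    (vis : List Bool) (col : List Int) (cnt : Int × Int) :
    (List Bool × List Int) × (Int × Int) :=
  match nbrs with
  | [] => ((vis, col), cnt)
  | V :: rest =>
      if !(PySem.List.pyGetD vis V true) then
        let r := pvDfsA graph fuel V (-C) vis col
        pvLoopA graph fuel rest C r.1.1 r.1.2 (cnt.1 + r.2.1, cnt.2 + r.2.2)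
      else
        pvLoopA graph fuel rest C vis col cnt
termination_by (fuel, nbrs.length + 1)
end

-- for i in range(1, N+1): if not visited[i]: a,b = DFS(i,1); max_group += max(a,b)
def pvOuterA (graph : List (List Int)) : List Int → List Bool → List Int → Int → Int
  | [], _, _, total => total
  | i :: rest, vis, col, total =>
      if !(PySem.List.pyGetD vis i true) then
        let r := pvDfsA graph (vis.length + 1) i 1 vis col
        pvOuterA graph rest r.1.1 r.1.2 (total + max r.2.1 r.2.2)
      else
        pvOuterA graph rest vis col total

def football_match (N_players : Int) (M_tackles : List (Int × Int)) : Int :=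
  let n1 := (N_players + 1).toNat
  let graph := M_tackles.foldl (fun g p => pvAppendAt (pvAppendAt g p.1 p.2) p.2 p.1)
    (List.replicate n1 ([] : List Int))
  pvOuterA graph (PySem.List.pyRange 1 (N_players + 1) 1)
    (List.replicate n1 false) (List.replicate n1 (0 : Int)) 0

-- ===== PORT B =====
-- while stack: u,c = stack.pop(); skip if visited, else mark, count, push neighbours (reversed,
-- colour -c).  Stack kept top-first, so reversed-append-then-pop-last is cons at the head.
def pvIterB (graph : List (List Int)) (vis : List Bool) (stack : List (Int × Int)) (c0 c1 : Int) :
    List Bool × Int × Int :=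
  match stack with
  | [] => (vis, c0, c1)
  | (U, C) :: rest =>
      if _h : PySem.List.pyGetD vis U true = true then
        pvIterB graph vis rest c0 c1
      else
        let p := if C = 1 then (c0 + 1, c1) else (c0, c1 + 1)
        pvIterB graph (PySem.List.pySetD vis U true)
          ((PySem.List.pyGetD graph U []).map (fun v => (v, -C)) ++ rest) p.1 p.2
termination_by (pvCF vis, stack.length)
decreasing_by
  · exact Prod.Lex.right _ (by simp)
  · exact Prod.Lex.left _ _ (pvCF_pySetD_lt (by simpa using _h))

-- for i in range(1, N+1): if visited[i]: continue; run the stack; total += max(count0, count1)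
def pvOuterB (graph : List (List Int)) : List Int → List Bool → Int → Int
  | [], _, total => total
  | i :: rest, vis, total =>
      if PySem.List.pyGetD vis i true then
        pvOuterB graph rest vis total
      else
        let r := pvIterB graph vis [(i, 1)] 0 0
        pvOuterB graph rest r.1 (total + max r.2.1 r.2.2)

def football_match_alt (N_players : Int) (M_tackles : List (Int × Int)) : Int :=
  let n1 := (N_players + 1).toNat
  let graph := M_tackles.foldl (fun g p => pvAppendAt (pvAppendAt g p.1 p.2) p.2 p.1)
    (List.replicate n1 ([] : List Int))
  pvOuterB graph (PySem.List.pyRange 1 (N_players + 1) 1) (List.replicate n1 false) 0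

-- ===== PRECONDITION & SPEC =====
-- Pre_ excludes exactly the inputs where Python A raises IndexError: an edge endpoint that is
-- not a valid (possibly negative) Python index into the N+1 node arrays.
def Pre_football_match (N_players : Int) (M_tackles : List (Int × Int)) : Prop :=
  ∀ p ∈ M_tackles, PySem.Raise.InRange ((N_players + 1).toNat) p.1 ∧
    PySem.Raise.InRange ((N_players + 1).toNat) p.2
instance (N_players : Int) (M_tackles : List (Int × Int)) : Decidable (Pre_football_match N_players M_tackles) := by unfold Pre_football_match; infer_instance
def pvWitness_football_match : Int × (List (Int × Int)) := (3, [(1, 2), (2, 3), (1, 3)])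

def Spec_football_match (N_players : Int) (M_tackles : List (Int × Int)) (out : Int) : Prop := out = football_match_alt N_players M_tackles
instance (N_players : Int) (M_tackles : List (Int × Int)) (out : Int) : Decidable (Spec_football_match N_players M_tackles out) := by unfold Spec_football_match; infer_instance

-- ===== CLAIM (what is proved, stated in full; the proofs are below) =====
def Claim_equal_football_match : Prop := ∀ (N_players : Int) (M_tackles : List (Int × Int)), Dom_football_match N_players M_tackles → Pre_football_match N_players M_tackles → Spec_football_match N_players M_tackles (football_match N_players M_tackles)

-- ===== LEMMAS AND PROOFS =====

theorem pvIdx_lt {n : Nat} {i : Int} {k : Nat} (h : PySem.List.pyIdx? n i = some k) : k < n := by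
  unfold PySem.List.pyIdx? at h
  split_ifs at h with h1 h2 h3 <;> simp at h <;> omega

theorem pvCF_set_le {xs : List Bool} {k : Nat} (hk : k < xs.length) :
    pvCF (xs.set k true) ≤ pvCF xs := by
  unfold pvCF
  have h1 := List.set_eq_take_cons_drop true hk
  have h2 : xs = xs.take k ++ xs[k] :: xs.drop (k+1) := by
    conv_lhs => rw [← List.take_append_drop k xs, ← List.getElem_cons_drop hk]
  rw [h1]; conv_rhs => rw [h2]
  cases xs[k] <;> simp [List.countP_append]

theorem pvCF_pySetD_le (xs : List Bool) (i : Int) :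
    pvCF (PySem.List.pySetD xs i true) ≤ pvCF xs := by
  unfold PySem.List.pySetD PySem.List.pySet?
  rcases hk : PySem.List.pyIdx? xs.length i with _ | k
  · simp
  · simpa using pvCF_set_le (pvIdx_lt hk)

theorem pvCF_pos {xs : List Bool} {i : Int} (h : PySem.List.pyGetD xs i true = false) :
    0 < pvCF xs := by
  obtain ⟨k, _, hlt, hf⟩ := pvGetDfalse h
  have : false ∈ xs := List.mem_of_getElem? hf
  unfold pvCF
  exact List.countP_pos_iff.mpr ⟨false, this, rfl⟩

-- visited only grows through the recursive traversal
theorem pvMono (graph : List (List Int)) :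
    ∀ fuel : Nat,
      (∀ U C vis col, pvCF (pvDfsA graph fuel U C vis col).1.1 ≤ pvCF vis) ∧
      (∀ nbrs C vis col cnt, pvCF (pvLoopA graph fuel nbrs C vis col cnt).1.1 ≤ pvCF vis) := by
  intro fuel
  induction fuel with
  | zero =>
      constructor
      · intro U C vis col; simp [pvDfsA]
      · intro nbrs
        induction nbrs with
        | nil => intro C vis col cnt; simp [pvLoopA]
        | cons V rest ih =>
            intro C vis col cnt
            cases hv : PySem.List.pyGetD vis V true
            · simpa [pvLoopA, hv, pvDfsA] using ih C vis col _
            · simpa [pvLoopA, hv] using ih C vis col cnt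
  | succ n ihn =>
      have hd : ∀ U C vis col, pvCF (pvDfsA graph (n+1) U C vis col).1.1 ≤ pvCF vis := by
        intro U C vis col
        calc pvCF (pvDfsA graph (n+1) U C vis col).1.1
            ≤ pvCF (PySem.List.pySetD vis U true) := by
              simpa [pvDfsA] using ihn.2 _ _ _ _ _
          _ ≤ pvCF vis := pvCF_pySetD_le vis U
      refine ⟨hd, ?_⟩
      intro nbrs
      induction nbrs with
      | nil => intro C vis col cnt; simp [pvLoopA]
      | cons V rest ih =>
          intro C vis col cnt
          cases hv : PySem.List.pyGetD vis V true
          · simp only [pvLoopA, hv, Bool.not_false, if_true]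
            exact le_trans (ih _ _ _ _) (hd V (-C) vis col)
          · simpa [pvLoopA, hv] using ih C vis col cnt

-- the iterative stack run simulates A's neighbour loop (and through it the whole DFS)
theorem pvSimLoop (graph : List (List Int)) :
    ∀ (fuel : Nat) (nbrs : List Int) (C : Int) (vis : List Bool) (col : List Int)
      (cnt : Int × Int) (stack : List (Int × Int)) (c0 c1 : Int),
      pvCF vis ≤ fuel →
      pvIterB graph vis (nbrs.map (fun v => (v, -C)) ++ stack) (c0 + cnt.1) (c1 + cnt.2)
        = pvIterB graph (pvLoopA graph fuel nbrs C vis col cnt).1.1 stack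
            (c0 + (pvLoopA graph fuel nbrs C vis col cnt).2.1)
            (c1 + (pvLoopA graph fuel nbrs C vis col cnt).2.2) := by
  intro fuel
  induction fuel with
  | zero =>
      intro nbrs
      induction nbrs with
      | nil => intro C vis col cnt stack c0 c1 _; simp [pvLoopA]
      | cons V rest ih =>
          intro C vis col cnt stack c0 c1 hcf
          cases hv : PySem.List.pyGetD vis V true
          · exact absurd hcf (by have := pvCF_pos hv; omega)
          · simp only [List.map_cons, List.cons_append]
            rw [pvIterB]
            simp only [pvLoopA, hv, Bool.not_true, dite_true, Bool.false_eq_true, if_false]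
            exact ih C vis col cnt stack c0 c1 hcf
  | succ n ihf =>
      intro nbrs
      induction nbrs with
      | nil => intro C vis col cnt stack c0 c1 _; simp [pvLoopA]
      | cons V rest ih =>
          intro C vis col cnt stack c0 c1 hcf
          cases hv : PySem.List.pyGetD vis V true
          · -- unvisited: popping V marks and counts it and pushes its neighbours,
            -- which is exactly pvDfsA on V followed by the rest of the loop
            have hlt := pvCF_pySetD_lt hv
            have hmono := (pvMono graph n).2 (PySem.List.pyGetD graph V []) (-C)
              (PySem.List.pySetD vis V true) (PySem.List.pySetD col V (-C))
              (if -C = 1 then ((1 : Int), (0 : Int)) else (0, 1))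
            simp only [List.map_cons, List.cons_append]
            rw [pvIterB]
            simp only [hv, Bool.false_eq_true, dite_false]
            rw [pvLoopA]
            simp only [hv, Bool.not_false, if_true, pvDfsA]
            have hstep := ihf (PySem.List.pyGetD graph V []) (-C)
              (PySem.List.pySetD vis V true) (PySem.List.pySetD col V (-C))
              (if -C = 1 then ((1 : Int), (0 : Int)) else (0, 1))
              (List.map (fun v => (v, -C)) rest ++ stack)
              (c0 + cnt.1) (c1 + cnt.2) (by omega)
            set L := pvLoopA graph n (PySem.List.pyGetD graph V []) (-C)
              (PySem.List.pySetD vis V true) (PySem.List.pySetD col V (-C))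
              (if -C = 1 then ((1 : Int), (0 : Int)) else (0, 1)) with hL
            have hc : (if -C = 1 then (c0 + cnt.1 + 1, c1 + cnt.2)
                  else (c0 + cnt.1, c1 + cnt.2 + 1)).1
                    = c0 + cnt.1 + (if -C = 1 then ((1 : Int), (0 : Int)) else (0, 1)).1 ∧
                (if -C = 1 then (c0 + cnt.1 + 1, c1 + cnt.2)
                  else (c0 + cnt.1, c1 + cnt.2 + 1)).2
                    = c1 + cnt.2 + (if -C = 1 then ((1 : Int), (0 : Int)) else (0, 1)).2 := by
              by_cases hC : -C = 1 <;> simp [hC]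
            have happ := ih C L.1.1 L.1.2 (cnt.1 + L.2.1, cnt.2 + L.2.2) stack c0 c1 (by omega)
            rw [hc.1, hc.2, hstep]
            simpa [add_assoc] using happ
          · simp only [List.map_cons, List.cons_append]
            rw [pvIterB]
            simp only [pvLoopA, hv, Bool.not_true, dite_true, Bool.false_eq_true, if_false]
            exact ih C vis col cnt stack c0 c1 hcf

-- outer root loops agree: each unvisited root runs one component, recursively in A,
-- by one stack run in B
theorem pvOuter_eq (graph : List (List Int)) :
    ∀ (roots : List Int) (vis : List Bool) (col : List Int) (total : Int),
      pvOuterA graph roots vis col total = pvOuterB graph roots vis total := by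
  intro roots
  induction roots with
  | nil => intro vis col total; rfl
  | cons i rest ih =>
      intro vis col total
      cases hv : PySem.List.pyGetD vis i true
      · have hlt := pvCF_pySetD_lt hv
        have hcl : pvCF vis ≤ vis.length := List.countP_le_length
        have hstep := pvSimLoop graph vis.length (PySem.List.pyGetD graph i []) 1
          (PySem.List.pySetD vis i true) (PySem.List.pySetD col i 1)
          ((1 : Int), (0 : Int)) [] 0 0 (by omega)
        simp only [zero_add, add_zero, List.append_nil] at hstep
        rw [pvOuterA, pvOuterB]
        simp only [hv, Bool.not_false, if_true, Bool.false_eq_true, if_false, pvDfsA]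
        rw [pvIterB]
        simp only [hv, Bool.false_eq_true, dite_false, if_true, List.append_nil, zero_add]
        rw [hstep, pvIterB]
        exact ih _ _ _
      · rw [pvOuterA, pvOuterB]
        simp only [hv, Bool.not_true, Bool.false_eq_true, if_false, if_true]
        exact ih _ _ _

-- ===== VERDICT (by name: the statement is the Claim_ definition above) =====
theorem football_match_spec : Claim_equal_football_match := by
  intro N_players M_tackles _ _
  unfold Spec_football_match football_match football_match_alt
  exact pvOuter_eq _ _ _ _ _
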